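-- pv_equiv track=rewrite | github.com/pypi-data/pypi-mirror-362 | packages/agentops-ai/agentops_ai-1.1.7-py3-none-any.whl/agentops_ai/agentops_core/services/test_generator.py | _add_risk_comments
-- ===== SOURCE A (Python) =====
-- def _add_risk_comments(code):
--     lines = code.split("\n")
--     out = []
--     for i, line in enumerate(lines):
--         if line.strip().startswith("def test_"):
--             out.append("# Risk: medium | Importance: auto-generated by AgentOps")
--         out.append(line)
--     return "\n".join(out)
-- ===== SOURCE B (Python) =====
-- def _add_risk_comments(code):
--     comment = "# Risk: medium | Importance: auto-generated by AgentOps\n"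
--     n = len(code)
--     # stage 1: collect the offsets of line starts whose line matches
--     cuts = []
--     pos = 0  # start of the current line
--     while True:
--         j = pos
--         while j < n and code[j] in " \t\r\x0b\x0c":
--             j += 1
--         if code.startswith("def test_", j):
--             cuts.append(pos)
--         k = j
--         while k < n and code[k] != "\n":
--             k += 1
--         if k == n:
--             break
--         pos = k + 1
--     # stage 2: splice the comment into slices of the original string
--     parts = []
--     prev = 0
--     for c in cuts:
--         parts.append(code[prev:c])
--         parts.append(comment)
--         prev = c
--     parts.append(code[prev:])
--     return "".join(parts)
-- ===== Notes on version B (the rewrite author's own statement) =====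
-- stated objective: alternative
-- what changed: Replaces split-into-lines with per-line strip/startswith and list rebuild by a two-stage offset algorithm: an index scan over the raw string (explicit whitespace skip, startswith at an offset) records the offsets of matching line starts, then the output is assembled by splicing the comment between slices of the original string.
import Mathlib
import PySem

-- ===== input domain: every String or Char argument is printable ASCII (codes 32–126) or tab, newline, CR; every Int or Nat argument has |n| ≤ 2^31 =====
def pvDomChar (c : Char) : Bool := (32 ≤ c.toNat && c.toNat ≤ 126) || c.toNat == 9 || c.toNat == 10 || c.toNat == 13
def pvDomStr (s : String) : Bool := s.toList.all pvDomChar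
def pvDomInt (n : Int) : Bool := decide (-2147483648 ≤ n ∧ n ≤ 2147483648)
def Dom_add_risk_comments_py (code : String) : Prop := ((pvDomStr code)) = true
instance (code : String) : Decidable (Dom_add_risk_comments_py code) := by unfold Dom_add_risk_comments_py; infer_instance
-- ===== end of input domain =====

-- B replaces A's split-into-lines rebuild by a two-stage offset algorithm (index scan
-- collecting matching line-start offsets, then splicing the comment between slices);
-- objective: alternative (same O(n) cost, different algorithm).


def pvComment : String := "# Risk: medium | Importance: auto-generated by AgentOps"
def pvCommentNl : String := "# Risk: medium | Importance: auto-generated by AgentOps\n"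
def pvP : List Char := "def test_".toList

-- ===== PORT A =====
def add_risk_comments_py (code : String) : String :=
  let lines := (PySem.Str.split? code "\n").getD [] /- sep "\n" ≠ "": split? is some, getD exact -/
  let out := lines.foldl
    (fun acc line =>
      if PySem.Str.startswith (PySem.Str.strip line) "def test_" then
        (acc ++ [pvComment]) ++ [line]
      else
        acc ++ [line]) []
  PySem.Str.join "\n" out

-- ===== PORT B =====
-- B's Python whitespace set " \t\r\x0b\x0c" (code[j] in " \t\r\x0b\x0c"), char for char
def pvWsb (c : Char) : Bool := c = ' ' || c = '\t' || c = '\r' || c = '\x0b' || c = '\x0c'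

-- inner loop `while j < n and code[j] in " \t\r\x0b\x0c": j += 1`
-- (fuel-structural recursion; fuel = cs.length - j bounds the remaining iterations exactly)
def pvWsSkipF : Nat → List Char → Nat → Nat
  | 0, _, j => j
  | fuel + 1, cs, j =>
    if h : j < cs.length then
      if pvWsb cs[j] then pvWsSkipF fuel cs (j + 1) else j
    else j

def pvWsSkip (cs : List Char) (j : Nat) : Nat := pvWsSkipF (cs.length - j) cs j

-- inner loop `while k < n and code[k] != "\n": k += 1`
def pvNlScanF : Nat → List Char → Nat → Nat
  | 0, _, k => k
  | fuel + 1, cs, k =>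
    if h : k < cs.length then
      if cs[k] ≠ '\n' then pvNlScanF fuel cs (k + 1) else k
    else k

def pvNlScan (cs : List Char) (k : Nat) : Nat := pvNlScanF (cs.length - k) cs k

-- stage 1: `while True:` loop collecting line-start offsets (Python appends to `cuts`;
-- the port returns the appended-to-the-right list of this iteration and the rest).
-- Python's locals j (= pvWsSkip cs pos) and k (= pvNlScan cs j) are inlined;
-- hit = code.startswith("def test_", j), exact since 0 ≤ j ≤ len(code);
-- fuel = cs.length + 1 - pos bounds the remaining iterations exactly
def pvCutsF : Nat → List Char → Nat → List Nat
  | 0, _, _ => []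
  | fuel + 1, cs, pos =>
    if h : pvNlScan cs (pvWsSkip cs pos) < cs.length then
      (if pvP.isPrefixOf (cs.drop (pvWsSkip cs pos)) then [pos] else []) ++
        pvCutsF fuel cs (pvNlScan cs (pvWsSkip cs pos) + 1)
    else
      (if pvP.isPrefixOf (cs.drop (pvWsSkip cs pos)) then [pos] else [])

def pvCuts (cs : List Char) (pos : Nat) : List Nat := pvCutsF (cs.length + 1 - pos) cs pos

def add_risk_comments_py_alt (code : String) : String :=
  let cuts := pvCuts code.toList 0
  -- stage 2: `for c in cuts:` with parts list and prev offset, then "".join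
  let st := cuts.foldl
    (fun (st : List String × Nat) (c : Nat) =>
      (st.1 ++ [PySem.Str.slice code (some (st.2 : Int)) (some (c : Int)), pvCommentNl], c))
    ([], 0)
  PySem.Str.join "" (st.1 ++ [PySem.Str.slice code (some (st.2 : Int)) none])

-- ===== PRECONDITION & SPEC =====
def Spec_add_risk_comments_py (code : String) (out : String) : Prop := out = add_risk_comments_py_alt code
instance (code : String) (out : String) : Decidable (Spec_add_risk_comments_py code out) := by unfold Spec_add_risk_comments_py; infer_instance

-- ===== CLAIM (what is proved, stated in full; the proofs are below) =====
def Claim_equal_add_risk_comments_py : Prop := ∀ (code : String), Dom_add_risk_comments_py code → Spec_add_risk_comments_py code (add_risk_comments_py code)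

-- ===== LEMMAS AND PROOFS =====

-- ---------- the common reference value: per-line map over the '\n'-split, joined ----------

def pvSplit : List Char → List (List Char)
  | [] => [[]]
  | c :: r =>
    if c = '\n' then [] :: pvSplit r
    else
      match pvSplit r with
      | [] => [[c]]   -- unreachable: pvSplit never returns []
      | h :: t => (c :: h) :: t

def pvCharF (l : List Char) : List Char :=
  if PySem.Chars.startswith (PySem.Chars.strip l) pvP then pvComment.toList ++ '\n' :: l else l

def pvRef (s : List Char) : List Char :=
  PySem.Chars.join ['\n'] ((pvSplit s).map pvCharF)

theorem pv_dwl (l : List Char) (p : Char → Bool) :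
    l.dropWhile p = l.drop (l.takeWhile p).length := by
  induction l with
  | nil => rfl
  | cons c r ih =>
    by_cases h : p c
    · simp [List.takeWhile_cons, h, ih]
    · simp [List.dropWhile_cons, List.takeWhile_cons, h]

theorem pv_hd_dropWhile (l t : List Char) (c : Char) (p : Char → Bool)
    (h : l.dropWhile p = c :: t) : p c = false := by
  induction l with
  | nil => simp at h
  | cons a r ih =>
    rw [List.dropWhile_cons] at h
    split at h
    · exact ih h
    · next hn => cases h; simpa using hn

theorem pv_takeWhile_append_all (p : Char → Bool) (w x : List Char)
    (h : ∀ c ∈ w, p c = true) : (w ++ x).takeWhile p = w ++ x.takeWhile p := by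
  induction w with
  | nil => rfl
  | cons a r ih =>
    simp only [List.cons_append, List.takeWhile_cons, h a (by simp), if_true]
    rw [ih (fun c hc => h c (by simp [hc]))]

theorem pvSplit_ne_nil (s : List Char) : pvSplit s ≠ [] := by
  induction s with
  | nil => simp [pvSplit]
  | cons c r ih =>
    unfold pvSplit
    split
    · simp
    · split
      · simp
      · simp

-- pvSplit equations in takeWhile/dropWhile form
theorem pvSplit_no_nl (s : List Char) (h : '\n' ∉ s) : pvSplit s = [s] := by
  induction s with
  | nil => rfl
  | cons c r ih =>
    unfold pvSplit
    have hc : ¬ c = '\n' := fun hc => h (by simp [hc])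
    rw [if_neg hc, ih (fun hr => h (by simp [hr]))]

theorem pvSplit_append_nl (l r : List Char) (h : '\n' ∉ l) :
    pvSplit (l ++ '\n' :: r) = l :: pvSplit r := by
  induction l with
  | nil => simp [pvSplit]
  | cons c l' ih =>
    have hc : ¬ c = '\n' := fun hc => h (by simp [hc])
    simp only [List.cons_append]
    rw [pvSplit, if_neg hc, ih (fun hr => h (by simp [hr]))]

-- ---------- A-side: foldl/join equals the per-line map, then splitOn = pvSplit ----------

theorem pv_join_append (s : List Char) (xs ys : List (List Char))
    (hx : xs ≠ []) (hy : ys ≠ []) :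
    PySem.Chars.join s (xs ++ ys) =
      PySem.Chars.join s xs ++ s ++ PySem.Chars.join s ys := by
  induction xs with
  | nil => exact absurd rfl hx
  | cons a t ih =>
    cases t with
    | nil =>
      cases ys with
      | nil => exact absurd rfl hy
      | cons b u =>
        simp [PySem.Chars.join_singleton, PySem.Chars.join_cons_cons]
    | cons b u =>
      have := ih (by simp)
      simp only [List.cons_append, PySem.Chars.join_cons_cons] at *
      simp [this]

def pvG (c : List Char) (P : List Char → Bool) (l : List Char) : List (List Char) :=
  if P l then [c, l] else [l]

theorem pvG_ne_nil (c : List Char) (P : List Char → Bool) (l : List Char) :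
    pvG c P l ≠ [] := by
  unfold pvG; split <;> simp

theorem pv_flatMap_ne_nil (c : List Char) (P : List Char → Bool)
    (ls : List (List Char)) (h : ls ≠ []) :
    ls.flatMap (pvG c P) ≠ [] := by
  cases ls with
  | nil => exact absurd rfl h
  | cons a t =>
    simp only [List.flatMap_cons]
    intro hcontra
    exact pvG_ne_nil c P a (List.append_eq_nil_iff.mp hcontra).1

theorem pv_join_flatMap_eq_map (s : List Char) (c : List Char) (P : List Char → Bool)
    (ls : List (List Char)) :
    PySem.Chars.join s (ls.flatMap (pvG c P)) =
      PySem.Chars.join s (ls.map (fun l => if P l then c ++ s ++ l else l)) := by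
  induction ls with
  | nil => simp
  | cons a t ih =>
    cases t with
    | nil =>
      simp only [List.flatMap_cons, List.flatMap_nil, List.append_nil,
        List.map_cons, List.map_nil, PySem.Chars.join_singleton]
      unfold pvG
      split <;> simp [PySem.Chars.join_singleton, PySem.Chars.join_cons_cons]
    | cons b u =>
      have hne : (b :: u).flatMap (pvG c P) ≠ [] :=
        pv_flatMap_ne_nil c P (b :: u) (by simp)
      simp only [List.flatMap_cons, List.map_cons]
      rw [pv_join_append s (pvG c P a) _ (pvG_ne_nil c P a)
        (by simpa [List.flatMap_cons] using hne)]
      have hmap : PySem.Chars.join s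
          ((if P a then c ++ s ++ a else a) ::
            (b :: u).map (fun l => if P l then c ++ s ++ l else l)) =
          (if P a then c ++ s ++ a else a) ++ s ++
            PySem.Chars.join s ((b :: u).map (fun l => if P l then c ++ s ++ l else l)) := by
        simp [PySem.Chars.join_cons_cons]
      rw [List.map_cons] at hmap
      rw [hmap]
      have hIH : PySem.Chars.join s ((b :: u).flatMap (pvG c P)) =
          PySem.Chars.join s ((b :: u).map (fun l => if P l then c ++ s ++ l else l)) := ih
      simp only [List.flatMap_cons, List.map_cons] at hIH
      rw [← hIH]
      unfold pvG
      split <;> simp [PySem.Chars.join_singleton, PySem.Chars.join_cons_cons]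

-- A's foldl/join at String level equals the per-line map join
theorem pv_main (ls : List String) :
    PySem.Str.join "\n"
      (ls.foldl (fun acc line =>
        if PySem.Str.startswith (PySem.Str.strip line) "def test_" then
          (acc ++ [pvComment]) ++ [line]
        else acc ++ [line]) []) =
    PySem.Str.join "\n"
      (ls.map (fun line =>
        if PySem.Str.startswith (PySem.Str.strip line) "def test_" then
          pvComment ++ "\n" ++ line
        else line)) := by
  have hfun : (fun (acc : List String) line =>
      if PySem.Str.startswith (PySem.Str.strip line) "def test_" then
        (acc ++ [pvComment]) ++ [line]
      else acc ++ [line]) =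
      (fun acc line => acc ++
        (if PySem.Str.startswith (PySem.Str.strip line) "def test_" then [pvComment, line]
         else [line])) := by
    funext acc line; split <;> simp
  rw [hfun, PySem.List.foldl_append_eq_flatMap, List.nil_append]
  apply String.toList_injective
  rw [PySem.Str.toList_join, PySem.Str.toList_join]
  have hGmap : (ls.flatMap (fun line =>
      if PySem.Str.startswith (PySem.Str.strip line) "def test_" then [pvComment, line]
      else [line])).map String.toList =
      (ls.map String.toList).flatMap
        (pvG pvComment.toList
          (fun l => PySem.Str.startswith (PySem.Str.strip (String.ofList l)) "def test_")) := by
    simp only [List.map_flatMap, List.flatMap_map]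
    apply List.flatMap_congr
    intro x _
    unfold pvG
    simp only [String.ofList_toList]
    split <;> simp
  have hFmap : ((ls.map (fun line =>
      if PySem.Str.startswith (PySem.Str.strip line) "def test_" then pvComment ++ "\n" ++ line
      else line)).map String.toList) =
      (ls.map String.toList).map
        (fun l => if PySem.Str.startswith (PySem.Str.strip (String.ofList l)) "def test_" then
          pvComment.toList ++ "\n".toList ++ l else l) := by
    simp only [List.map_map]
    apply List.map_congr_left
    intro x _
    simp only [Function.comp, String.ofList_toList]
    split <;> simp
  rw [hGmap, hFmap]
  exact pv_join_flatMap_eq_map "\n".toList pvComment.toList _ (ls.map String.toList)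

-- splitOn with separator "\n" computes pvSplit
theorem pv_splitOn_go (fuel : Nat) (l cur : List Char) (acc : List (List Char))
    (h : l.length < fuel) :
    PySem.Chars.splitOn.go ['\n'] fuel l cur acc =
      acc.reverse ++
        (match pvSplit l with
         | [] => []   -- unreachable
         | hd :: t => (cur.reverse ++ hd) :: t) := by
  induction fuel generalizing l cur acc with
  | zero => omega
  | succ fuel ih =>
    cases l with
    | nil =>
      show ((cur.reverse :: acc).reverse : List (List Char)) = _
      simp [pvSplit]
    | cons c rest =>
      by_cases hc : c = '\n'
      · subst hc
        have hstep : PySem.Chars.splitOn.go ['\n'] (fuel + 1) ('\n' :: rest) cur acc =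
            PySem.Chars.splitOn.go ['\n'] fuel rest [] (cur.reverse :: acc) := by
          show (if ['\n'].isPrefixOf ('\n' :: rest) = true then
              PySem.Chars.splitOn.go ['\n'] fuel (List.drop 1 ('\n' :: rest)) [] (cur.reverse :: acc)
            else PySem.Chars.splitOn.go ['\n'] fuel rest ('\n' :: cur) acc) = _
          rw [if_pos (by simp [List.isPrefixOf])]
          rfl
        rw [hstep, ih rest [] (cur.reverse :: acc) (by simpa using Nat.lt_of_succ_lt_succ h)]
        obtain ⟨hd, t, hrest⟩ : ∃ hd t, pvSplit rest = hd :: t := by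
          cases hsp : pvSplit rest with
          | nil => exact absurd hsp (pvSplit_ne_nil rest)
          | cons hd t => exact ⟨hd, t, rfl⟩
        rw [show pvSplit ('\n' :: rest) = [] :: pvSplit rest from by rw [pvSplit, if_pos rfl]]
        rw [hrest]
        simp
      · have hstep : PySem.Chars.splitOn.go ['\n'] (fuel + 1) (c :: rest) cur acc =
            PySem.Chars.splitOn.go ['\n'] fuel rest (c :: cur) acc := by
          show (if ['\n'].isPrefixOf (c :: rest) = true then
              PySem.Chars.splitOn.go ['\n'] fuel (List.drop 1 (c :: rest)) [] (cur.reverse :: acc)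
            else PySem.Chars.splitOn.go ['\n'] fuel rest (c :: cur) acc) = _
          rw [if_neg (by simp [List.isPrefixOf]; intro heq; exact hc heq.symm)]
        rw [hstep, ih rest (c :: cur) acc (by simpa using Nat.lt_of_succ_lt_succ h)]
        obtain ⟨hd, t, hrest⟩ : ∃ hd t, pvSplit rest = hd :: t := by
          cases hsp : pvSplit rest with
          | nil => exact absurd hsp (pvSplit_ne_nil rest)
          | cons hd t => exact ⟨hd, t, rfl⟩
        rw [show pvSplit (c :: rest) = match pvSplit rest with
              | [] => [[c]]
              | h :: t => (c :: h) :: t from by rw [pvSplit, if_neg hc]]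
        rw [hrest]
        simp

theorem pv_splitOn_eq (s : List Char) :
    PySem.Chars.splitOn s ['\n'] = pvSplit s := by
  rw [PySem.Chars.splitOn, pv_splitOn_go (s.length + 1) s [] [] (by omega)]
  cases hsp : pvSplit s with
  | nil => exact absurd hsp (pvSplit_ne_nil s)
  | cons hd t => simp

-- A's value, at char level
theorem pvA_eq_ref (code : String) :
    (add_risk_comments_py code).toList = pvRef code.toList := by
  show (PySem.Str.join "\n"
      (((PySem.Str.split? code "\n").getD []).foldl
        (fun acc line =>
          if PySem.Str.startswith (PySem.Str.strip line) "def test_" then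
            (acc ++ [pvComment]) ++ [line]
          else acc ++ [line]) [])).toList = pvRef code.toList
  rw [pv_main]
  have hsplit : (PySem.Str.split? code "\n").getD [] = (pvSplit code.toList).map String.ofList := by
    rw [PySem.Str.split?]
    have h1 : PySem.Chars.split? code.toList "\n".toList =
        some (PySem.Chars.splitOn code.toList ['\n']) := by
      rw [PySem.Chars.split?, if_neg (by simp [show ("\n".toList : List Char) = ['\n'] from rfl])]
      rw [show ("\n".toList : List Char) = ['\n'] from rfl]
    rw [h1, pv_splitOn_eq]
    rfl
  rw [hsplit, PySem.Str.toList_join, pvRef]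
  rw [show ("\n".toList : List Char) = ['\n'] from rfl]
  congr 1
  simp only [List.map_map]
  apply List.map_congr_left
  intro l hl
  simp only [Function.comp]
  by_cases hcond : PySem.Chars.startswith (PySem.Chars.strip l) pvP = true
  · have hc' : PySem.Chars.startswith (PySem.Chars.strip l)
        ['d', 'e', 'f', ' ', 't', 'e', 's', 't', '_'] = true := by simpa [pvP] using hcond
    simp [pvCharF, pvP, hc', String.toList_append]
  · have hc' : ¬ (PySem.Chars.startswith (PySem.Chars.strip l)
        ['d', 'e', 'f', ' ', 't', 'e', 's', 't', '_'] = true) := by simpa [pvP] using hcond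
    simp [pvCharF, pvP, hc']

-- ---------- the line-match predicate: B's offset test equals A's strip/startswith ----------

-- prefix tests ignore everything from the first '\n' on (pvP contains no '\n')
theorem pv_prefix_stop (p m t' : List Char) (hp : '\n' ∉ p) :
    p.isPrefixOf (m ++ '\n' :: t') = p.isPrefixOf m := by
  induction p generalizing m with
  | nil => simp [List.isPrefixOf]
  | cons a p' ih =>
    cases m with
    | nil =>
      have ha : ¬ (a = '\n') := fun h => hp (by simp [h])
      simp [List.isPrefixOf, ha]
    | cons b m' =>
      simp only [List.cons_append, List.isPrefixOf]
      rw [ih m' (fun h => hp (by simp [h]))]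

theorem pv_wsb_ne_nl (c : Char) (h : pvWsb c = true) : c ≠ '\n' := by
  intro hc; subst hc; simp [pvWsb] at h

theorem pv_dropWhile_wsb_split (s : List Char) :
    s.dropWhile pvWsb =
      (s.takeWhile (· ≠ '\n')).dropWhile pvWsb ++ s.dropWhile (· ≠ '\n') := by
  induction s with
  | nil => rfl
  | cons c r ih =>
    by_cases hw : pvWsb c
    · have hc : (decide (c ≠ '\n')) = true := by simpa using pv_wsb_ne_nl c hw
      have h1 : List.dropWhile pvWsb (c :: r) = List.dropWhile pvWsb r := by
        rw [List.dropWhile_cons, if_pos hw]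
      have h2 : List.takeWhile (fun x => decide (x ≠ '\n')) (c :: r) =
          c :: List.takeWhile (fun x => decide (x ≠ '\n')) r := by
        rw [List.takeWhile_cons, if_pos hc]
      have h3 : List.dropWhile (fun x => decide (x ≠ '\n')) (c :: r) =
          List.dropWhile (fun x => decide (x ≠ '\n')) r := by
        rw [List.dropWhile_cons, if_pos hc]
      have h4 : List.dropWhile pvWsb (c :: List.takeWhile (fun x => decide (x ≠ '\n')) r) =
          List.dropWhile pvWsb (List.takeWhile (fun x => decide (x ≠ '\n')) r) := by
        rw [List.dropWhile_cons, if_pos hw]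
      rw [h1, h2, h3, h4, ih]
    · by_cases hc : c = '\n'
      · subst hc
        simp [List.dropWhile_cons, List.takeWhile_cons, hw]
      · have hc' : (decide (c ≠ '\n')) = true := by simpa using hc
        have h1 : List.dropWhile pvWsb (c :: r) = c :: r := by
          rw [List.dropWhile_cons, if_neg (by simpa using hw)]
        have h2 : List.takeWhile (fun x => decide (x ≠ '\n')) (c :: r) =
            c :: List.takeWhile (fun x => decide (x ≠ '\n')) r := by
          rw [List.takeWhile_cons, if_pos hc']
        have h3 : List.dropWhile (fun x => decide (x ≠ '\n')) (c :: r) =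
            List.dropWhile (fun x => decide (x ≠ '\n')) r := by
          rw [List.dropWhile_cons, if_pos hc']
        have h4 : List.dropWhile pvWsb (c :: List.takeWhile (fun x => decide (x ≠ '\n')) r) =
            c :: List.takeWhile (fun x => decide (x ≠ '\n')) r := by
          rw [List.dropWhile_cons, if_neg (by simpa using hw)]
        rw [h1, h2, h3, h4, List.cons_append]
        congr 1
        exact (List.takeWhile_append_dropWhile (p := fun x => decide (x ≠ '\n')) (l := r)).symm

theorem pv_char_eq_iff (c d : Char) : c = d ↔ c.toNat = d.toNat := by
  constructor
  · intro h; rw [h]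
  · intro h; exact Char.ext (UInt32.toNat_inj.mp h)

-- on Dom characters other than '\n', B's whitespace set equals Python str.strip's
theorem pv_wsb_eq_isspace (c : Char) (hD : pvDomChar c = true) (hn : c ≠ '\n') :
    pvWsb c = PySem.Chars.isspace c := by
  have hn' : c.toNat ≠ 10 := fun h => hn ((pv_char_eq_iff c '\n').mpr (by simpa using h))
  have hD' : ((32 ≤ c.toNat ∧ c.toNat ≤ 126 ∨ c.toNat = 9) ∨ c.toNat = 10) ∨ c.toNat = 13 := by
    simpa [pvDomChar, Bool.or_eq_true, Bool.and_eq_true, decide_eq_true_eq] using hD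
  rw [Bool.eq_iff_iff]
  unfold pvWsb PySem.Chars.isspace
  have e1 : (' ').toNat = 32 := rfl
  have e2 : ('\t').toNat = 9 := rfl
  have e3 : ('\r').toNat = 13 := rfl
  have e4 : ('\x0b').toNat = 11 := rfl
  have e5 : ('\x0c').toNat = 12 := rfl
  simp only [Bool.or_eq_true, Bool.and_eq_true, decide_eq_true_eq, pv_char_eq_iff,
    e1, e2, e3, e4, e5]
  omega

theorem pv_dropWhile_congr (p q : Char → Bool) (l : List Char)
    (h : ∀ c ∈ l, p c = q c) : l.dropWhile p = l.dropWhile q := by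
  induction l with
  | nil => rfl
  | cons c r ih =>
    rw [List.dropWhile_cons, List.dropWhile_cons, ← h c (by simp)]
    split
    · exact ih (fun x hx => h x (by simp [hx]))
    · rfl

-- dropping trailing whitespace does not change the "def test_" prefix test
theorem pv_dropWhile_append (p : Char → Bool) (xs ys : List Char) (y : Char)
    (hy : p y = false) :
    List.dropWhile p (xs ++ y :: ys) = List.dropWhile p xs ++ y :: ys := by
  induction xs with
  | nil => simp [hy]
  | cons a r ih =>
    rw [List.cons_append, List.dropWhile_cons, List.dropWhile_cons]
    split
    · exact ih
    · rfl

theorem pv_prefix_rstrip (m : List Char) :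
    pvP.isPrefixOf (PySem.Chars.rstrip m) = pvP.isPrefixOf m := by
  rw [Bool.eq_iff_iff, List.isPrefixOf_iff_prefix, List.isPrefixOf_iff_prefix]
  constructor
  · intro h
    have hpref : PySem.Chars.rstrip m <+: m := by
      have h2 := List.reverse_prefix.mpr
        (List.dropWhile_suffix (l := m.reverse) PySem.Chars.isspace)
      simpa [PySem.Chars.rstrip] using h2
    exact h.trans hpref
  · rintro ⟨t, rfl⟩
    rw [PySem.Chars.rstrip, List.reverse_append]
    have hrev : pvP.reverse = '_' :: "tset fed".toList := by rfl
    rw [hrev, pv_dropWhile_append _ _ _ _ (by rfl), List.reverse_append, List.reverse_cons,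
      List.append_assoc]
    have hP : ("tset fed".toList.reverse ++ ['_'] : List Char) = pvP := by rfl
    rw [← List.append_assoc, hP]
    exact List.prefix_append _ _

-- the whole match lemma: B's test at a line start = A's test on the line
theorem pv_match_eq (s : List Char) (hD : ∀ c ∈ s, pvDomChar c = true) :
    pvP.isPrefixOf (s.dropWhile pvWsb) =
      PySem.Chars.startswith (PySem.Chars.strip (s.takeWhile (· ≠ '\n'))) pvP := by
  rw [pv_dropWhile_wsb_split s]
  have hsw : PySem.Chars.startswith (PySem.Chars.strip (s.takeWhile (· ≠ '\n'))) pvP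
      = pvP.isPrefixOf (PySem.Chars.strip (s.takeWhile (· ≠ '\n'))) := rfl
  rw [hsw, PySem.Chars.strip, pv_prefix_rstrip, PySem.Chars.lstrip]
  have hcong : (s.takeWhile (· ≠ '\n')).dropWhile pvWsb
      = (s.takeWhile (· ≠ '\n')).dropWhile PySem.Chars.isspace := by
    apply pv_dropWhile_congr
    intro c hc
    have hmem : c ∈ s := (List.takeWhile_sublist _).subset hc
    have hne : c ≠ '\n' := by simpa using List.mem_takeWhile_imp hc
    exact pv_wsb_eq_isspace c (hD c hmem) hne
  rw [hcong]
  cases h : s.dropWhile (fun x => decide (x ≠ '\n')) with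
  | nil => rw [List.append_nil]
  | cons c t' =>
    have hc : c = '\n' := by
      have := pv_hd_dropWhile s t' c _ h
      simpa using this
    subst hc
    exact pv_prefix_stop pvP _ t' (by decide)

-- ---------- B-side: cuts + splice equals the reference ----------

theorem pv_wsSkipF_eq (fuel : Nat) : ∀ (cs : List Char) (j : Nat), cs.length - j ≤ fuel →
    pvWsSkipF fuel cs j = j + ((cs.drop j).takeWhile pvWsb).length := by
  induction fuel with
  | zero =>
    intro cs j h
    show j = _
    rw [List.drop_eq_nil_of_le (by omega)]
    simp
  | succ fuel ih =>
    intro cs j h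
    show (if _ : j < cs.length then
        if pvWsb cs[j] then pvWsSkipF fuel cs (j + 1) else j
      else j) = _
    by_cases hj : j < cs.length
    · rw [dif_pos hj]
      by_cases hw : pvWsb cs[j]
      · rw [if_pos hw, ih cs (j + 1) (by omega),
          show cs.drop j = cs[j] :: cs.drop (j + 1) from (List.getElem_cons_drop hj).symm,
          List.takeWhile_cons, if_pos hw]
        simp only [List.length_cons]
        omega
      · rw [if_neg hw,
          show cs.drop j = cs[j] :: cs.drop (j + 1) from (List.getElem_cons_drop hj).symm,
          List.takeWhile_cons, if_neg hw]
        simp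
    · rw [dif_neg hj, List.drop_eq_nil_of_le (by omega)]
      simp

theorem pv_wsSkip_eq (cs : List Char) (j : Nat) :
    pvWsSkip cs j = j + ((cs.drop j).takeWhile pvWsb).length :=
  pv_wsSkipF_eq (cs.length - j) cs j (by omega)

theorem le_pvWsSkip (cs : List Char) (j : Nat) : j ≤ pvWsSkip cs j := by
  rw [pv_wsSkip_eq]
  omega

theorem pv_nlScanF_eq (fuel : Nat) : ∀ (cs : List Char) (k : Nat), cs.length - k ≤ fuel →
    pvNlScanF fuel cs k = k + ((cs.drop k).takeWhile (· ≠ '\n')).length := by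
  induction fuel with
  | zero =>
    intro cs k h
    show k = _
    rw [List.drop_eq_nil_of_le (by omega)]
    simp
  | succ fuel ih =>
    intro cs k h
    show (if _ : k < cs.length then
        if cs[k] ≠ '\n' then pvNlScanF fuel cs (k + 1) else k
      else k) = _
    by_cases hk : k < cs.length
    · rw [dif_pos hk]
      by_cases hne : cs[k] ≠ '\n'
      · rw [if_pos hne, ih cs (k + 1) (by omega),
          show cs.drop k = cs[k] :: cs.drop (k + 1) from (List.getElem_cons_drop hk).symm,
          List.takeWhile_cons, if_pos (by simpa using hne)]
        simp only [List.length_cons]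
        omega
      · rw [if_neg hne,
          show cs.drop k = cs[k] :: cs.drop (k + 1) from (List.getElem_cons_drop hk).symm,
          List.takeWhile_cons, if_neg (by simpa using hne)]
        simp
    · rw [dif_neg hk, List.drop_eq_nil_of_le (by omega)]
      simp

theorem pv_nlScan_eq (cs : List Char) (k : Nat) :
    pvNlScan cs k = k + ((cs.drop k).takeWhile (· ≠ '\n')).length :=
  pv_nlScanF_eq (cs.length - k) cs k (by omega)

theorem le_pvNlScan (cs : List Char) (k : Nat) : k ≤ pvNlScan cs k := by
  rw [pv_nlScan_eq]
  omega

theorem pv_cutsF_ge (fuel : Nat) : ∀ (cs : List Char) (pos : Nat),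
    ∀ c ∈ pvCutsF fuel cs pos, pos ≤ c := by
  induction fuel with
  | zero =>
    intro cs pos c hc
    simp [pvCutsF] at hc
  | succ fuel ih =>
    intro cs pos c hc
    show _ ≤ c
    rw [show pvCutsF (fuel + 1) cs pos =
        (if _ : pvNlScan cs (pvWsSkip cs pos) < cs.length then
          (if pvP.isPrefixOf (cs.drop (pvWsSkip cs pos)) then [pos] else []) ++
            pvCutsF fuel cs (pvNlScan cs (pvWsSkip cs pos) + 1)
        else
          (if pvP.isPrefixOf (cs.drop (pvWsSkip cs pos)) then [pos] else [])) from rfl] at hc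
    have h3 := le_pvWsSkip cs pos
    have h4 := le_pvNlScan cs (pvWsSkip cs pos)
    split at hc
    · rcases List.mem_append.mp hc with h1 | h2
      · split at h1
        · simp at h1; omega
        · simp at h1
      · have := ih cs (pvNlScan cs (pvWsSkip cs pos) + 1) c h2
        omega
    · split at hc
      · simp at hc; omega
      · simp at hc

def pvJoinRec (cs : List Char) : List Nat → Nat → List Char
  | [], prev => cs.drop prev
  | c :: rest, prev => (cs.drop prev).take (c - prev) ++ pvCommentNl.toList ++ pvJoinRec cs rest c

theorem pv_joinRec_shift (cs : List Char) (cuts : List Nat) (prev q : Nat)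
    (h1 : prev ≤ q) (h2 : ∀ c ∈ cuts, q ≤ c) :
    pvJoinRec cs cuts prev = (cs.drop prev).take (q - prev) ++ pvJoinRec cs cuts q := by
  cases cuts with
  | nil =>
    show cs.drop prev = (cs.drop prev).take (q - prev) ++ cs.drop q
    have hq : cs.drop q = (cs.drop prev).drop (q - prev) := by
      rw [List.drop_drop]
      congr 1
      omega
    rw [hq, List.take_append_drop]
  | cons c rest =>
    show (cs.drop prev).take (c - prev) ++ pvCommentNl.toList ++ pvJoinRec cs rest c =
      (cs.drop prev).take (q - prev) ++
        ((cs.drop q).take (c - q) ++ pvCommentNl.toList ++ pvJoinRec cs rest c)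
    have hc : q ≤ c := h2 c (by simp)
    have htake : (cs.drop prev).take (c - prev) =
        (cs.drop prev).take (q - prev) ++ (cs.drop q).take (c - q) := by
      have hq : cs.drop q = (cs.drop prev).drop (q - prev) := by
        rw [List.drop_drop]; congr 1; omega
      rw [hq, ← List.take_add]
      congr 1
      omega
    rw [htake]
    simp [List.append_assoc]

theorem pv_join_empty (ls : List (List Char)) : PySem.Chars.join [] ls = ls.flatten := by
  induction ls with
  | nil => simp [PySem.Chars.join, List.intercalate]
  | cons a t ih =>
    cases t with
    | nil => simp [PySem.Chars.join_singleton]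
    | cons b u =>
      rw [PySem.Chars.join_cons_cons, List.flatten_cons, ih]
      simp

theorem pv_cuts_joinRec_aux (cs : List Char) (hD : ∀ c ∈ cs, pvDomChar c = true) :
    ∀ (fuel pos : Nat), cs.length - pos < fuel → pos ≤ cs.length →
      pvJoinRec cs (pvCutsF fuel cs pos) pos = pvRef (cs.drop pos) := by
  intro fuel
  induction fuel with
  | zero => omega
  | succ fuel ih =>
    intro pos hfuel hpos
    have hw_all : ∀ c ∈ (cs.drop pos).takeWhile pvWsb, (decide (c ≠ '\n')) = true := by
      intro c hc
      simpa using pv_wsb_ne_nl c (List.mem_takeWhile_imp hc)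
    have hdropj : cs.drop (pvWsSkip cs pos) = (cs.drop pos).dropWhile pvWsb := by
      have h1 : (cs.drop pos).dropWhile pvWsb =
          cs.drop (pos + ((cs.drop pos).takeWhile pvWsb).length) := by
        rw [pv_dwl, List.drop_drop]
      rw [pv_wsSkip_eq, h1]
    have hLsplit : (cs.drop pos).takeWhile (· ≠ '\n') =
        (cs.drop pos).takeWhile pvWsb ++
          ((cs.drop pos).dropWhile pvWsb).takeWhile (· ≠ '\n') := by
      conv_lhs => rw [← List.takeWhile_append_dropWhile (p := pvWsb) (l := cs.drop pos)]
      exact pv_takeWhile_append_all _ _ _ hw_all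
    have hk : pvNlScan cs (pvWsSkip cs pos) =
        pos + ((cs.drop pos).takeWhile (· ≠ '\n')).length := by
      rw [pv_nlScan_eq, hdropj, pv_wsSkip_eq, hLsplit, List.length_append]
      omega
    have hLle : ((cs.drop pos).takeWhile (· ≠ '\n')).length ≤ cs.length - pos := by
      have h2 := (List.takeWhile_prefix (l := cs.drop pos) (· ≠ '\n')).length_le
      rwa [List.length_drop] at h2
    have hhit : pvP.isPrefixOf (cs.drop (pvWsSkip cs pos)) =
        PySem.Chars.startswith
          (PySem.Chars.strip ((cs.drop pos).takeWhile (· ≠ '\n'))) pvP := by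
      rw [hdropj]
      exact pv_match_eq (cs.drop pos) (fun c hc => hD c (List.drop_subset _ _ hc))
    rw [show pvCutsF (fuel + 1) cs pos =
        (if _ : pvNlScan cs (pvWsSkip cs pos) < cs.length then
          (if pvP.isPrefixOf (cs.drop (pvWsSkip cs pos)) then [pos] else []) ++
            pvCutsF fuel cs (pvNlScan cs (pvWsSkip cs pos) + 1)
        else
          (if pvP.isPrefixOf (cs.drop (pvWsSkip cs pos)) then [pos] else [])) from rfl]
    by_cases hklen : pvNlScan cs (pvWsSkip cs pos) < cs.length
    · rw [dif_pos hklen]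
      have hdk : (cs.drop pos).dropWhile (· ≠ '\n') =
          cs.drop (pvNlScan cs (pvWsSkip cs pos)) := by
        rw [pv_dwl, List.drop_drop, ← hk]
      have hnl : cs[pvNlScan cs (pvWsSkip cs pos)] = '\n' := by
        have h0 : (cs.drop pos).dropWhile (· ≠ '\n') =
            cs[pvNlScan cs (pvWsSkip cs pos)] ::
              cs.drop (pvNlScan cs (pvWsSkip cs pos) + 1) := by
          rw [hdk, ← List.getElem_cons_drop hklen]
        have h1 := pv_hd_dropWhile (cs.drop pos) _ _ _ h0
        simpa using h1
      have hcsk : cs.drop (pvNlScan cs (pvWsSkip cs pos)) =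
          '\n' :: cs.drop (pvNlScan cs (pvWsSkip cs pos) + 1) := by
        rw [← List.getElem_cons_drop hklen, hnl]
      have hsplitpos : cs.drop pos =
          (cs.drop pos).takeWhile (· ≠ '\n') ++
            '\n' :: cs.drop (pvNlScan cs (pvWsSkip cs pos) + 1) := by
        conv_lhs => rw [← List.takeWhile_append_dropWhile (p := (· ≠ '\n')) (l := cs.drop pos)]
        rw [hdk, hcsk]
      have hnoL : '\n' ∉ (cs.drop pos).takeWhile (· ≠ '\n') := by
        intro hm
        simpa using List.mem_takeWhile_imp hm
      have hps : pvSplit (cs.drop pos) =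
          (cs.drop pos).takeWhile (· ≠ '\n') ::
            pvSplit (cs.drop (pvNlScan cs (pvWsSkip cs pos) + 1)) := by
        conv_lhs => rw [hsplitpos]
        rw [pvSplit_append_nl _ _ hnoL]
      obtain ⟨hd, t, hsp2⟩ : ∃ hd t,
          pvSplit (cs.drop (pvNlScan cs (pvWsSkip cs pos) + 1)) = hd :: t := by
        cases hsp : pvSplit (cs.drop (pvNlScan cs (pvWsSkip cs pos) + 1)) with
        | nil => exact absurd hsp (pvSplit_ne_nil _)
        | cons hd t => exact ⟨hd, t, rfl⟩
      have href : pvRef (cs.drop pos) =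
          pvCharF ((cs.drop pos).takeWhile (· ≠ '\n')) ++
            '\n' :: pvRef (cs.drop (pvNlScan cs (pvWsSkip cs pos) + 1)) := by
        rw [pvRef, pvRef, hps, hsp2, List.map_cons, List.map_cons,
          PySem.Chars.join_cons_cons]
        simp
      have hcutsge := pv_cutsF_ge fuel cs (pvNlScan cs (pvWsSkip cs pos) + 1)
      have hih := ih (pvNlScan cs (pvWsSkip cs pos) + 1) (by omega) (by omega)
      have htake : (cs.drop pos).take (pvNlScan cs (pvWsSkip cs pos) + 1 - pos) =
          (cs.drop pos).takeWhile (· ≠ '\n') ++ ['\n'] := by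
        conv_lhs => rw [hsplitpos]
        rw [List.take_append, List.take_of_length_le (by omega),
          show pvNlScan cs (pvWsSkip cs pos) + 1 - pos -
              ((cs.drop pos).takeWhile (· ≠ '\n')).length = 1 from by omega]
        simp
      by_cases hb : pvP.isPrefixOf (cs.drop (pvWsSkip cs pos)) = true
      · rw [if_pos hb]
        show (cs.drop pos).take (pos - pos) ++ pvCommentNl.toList ++
            pvJoinRec cs (pvCutsF fuel cs (pvNlScan cs (pvWsSkip cs pos) + 1)) pos = _
        rw [Nat.sub_self, List.take_zero, List.nil_append,
          pv_joinRec_shift cs _ pos (pvNlScan cs (pvWsSkip cs pos) + 1) (by omega) hcutsge,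
          hih, htake, href]
        have hcf : pvCharF ((cs.drop pos).takeWhile (· ≠ '\n')) =
            pvComment.toList ++ '\n' :: (cs.drop pos).takeWhile (· ≠ '\n') := by
          rw [pvCharF, if_pos (by rw [← hhit]; exact hb)]
        rw [hcf, show pvCommentNl.toList = pvComment.toList ++ ['\n'] from rfl]
        simp
      · rw [if_neg hb, List.nil_append,
          pv_joinRec_shift cs _ pos (pvNlScan cs (pvWsSkip cs pos) + 1) (by omega) hcutsge,
          hih, htake, href]
        have hcf : pvCharF ((cs.drop pos).takeWhile (· ≠ '\n')) =
            (cs.drop pos).takeWhile (· ≠ '\n') := by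
          rw [pvCharF, if_neg (by rw [← hhit]; simpa using hb)]
        rw [hcf]
        simp
    · rw [dif_neg hklen]
      have hLfull : (cs.drop pos).takeWhile (· ≠ '\n') = cs.drop pos :=
        (List.takeWhile_prefix _).eq_of_length (by rw [List.length_drop]; omega)
      have hnoL : '\n' ∉ cs.drop pos := by
        intro hm
        rw [← hLfull] at hm
        simpa using List.mem_takeWhile_imp hm
      have hps : pvSplit (cs.drop pos) = [cs.drop pos] := pvSplit_no_nl _ hnoL
      have href : pvRef (cs.drop pos) = pvCharF (cs.drop pos) := by
        rw [pvRef, hps, List.map_cons, List.map_nil, PySem.Chars.join_singleton]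
      rw [hLfull] at hhit
      by_cases hb : pvP.isPrefixOf (cs.drop (pvWsSkip cs pos)) = true
      · rw [if_pos hb]
        show (cs.drop pos).take (pos - pos) ++ pvCommentNl.toList ++
            pvJoinRec cs [] pos = _
        rw [Nat.sub_self, List.take_zero, List.nil_append, href]
        have hcf : pvCharF (cs.drop pos) =
            pvComment.toList ++ '\n' :: cs.drop pos := by
          rw [pvCharF, if_pos (by rw [← hhit]; exact hb)]
        rw [hcf, show pvCommentNl.toList = pvComment.toList ++ ['\n'] from rfl]
        show pvComment.toList ++ ['\n'] ++ cs.drop pos = _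
        simp
      · rw [if_neg hb, href]
        have hcf : pvCharF (cs.drop pos) = cs.drop pos := by
          rw [pvCharF, if_neg (by rw [← hhit]; simpa using hb)]
        rw [hcf]
        rfl

theorem pv_cuts_joinRec (cs : List Char) (pos : Nat)
    (hD : ∀ c ∈ cs, pvDomChar c = true) (hpos : pos ≤ cs.length) :
    pvJoinRec cs (pvCuts cs pos) pos = pvRef (cs.drop pos) :=
  pv_cuts_joinRec_aux cs hD (cs.length + 1 - pos) pos (by omega) hpos

theorem pv_fold_splice (code : String) (cuts : List Nat) :
    ∀ (parts : List String) (prev : Nat),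
    (PySem.Str.join ""
      ((cuts.foldl
          (fun (st : List String × Nat) (c : Nat) =>
            (st.1 ++ [PySem.Str.slice code (some (st.2 : Int)) (some (c : Int)), pvCommentNl], c))
          (parts, prev)).1
        ++ [PySem.Str.slice code
            (some (((cuts.foldl
              (fun (st : List String × Nat) (c : Nat) =>
                (st.1 ++ [PySem.Str.slice code (some (st.2 : Int)) (some (c : Int)), pvCommentNl], c))
              (parts, prev)).2 : Nat) : Int)) none])).toList
      = (parts.map String.toList).flatten ++ pvJoinRec code.toList cuts prev := by
  induction cuts with
  | nil =>
    intro parts prev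
    show (PySem.Str.join "" (parts ++ [PySem.Str.slice code (some (prev : Int)) none])).toList = _
    rw [PySem.Str.toList_join, show ("".toList : List Char) = [] from rfl, pv_join_empty,
      List.map_append, List.flatten_append]
    show _ = _ ++ code.toList.drop prev
    congr 1
    simp [PySem.List.slice_from_natCast]
  | cons c rest ih =>
    intro parts prev
    simp only [List.foldl_cons]
    rw [ih (parts ++ [PySem.Str.slice code (some (prev : Int)) (some (c : Int)), pvCommentNl]) c]
    rw [List.map_append, List.flatten_append]
    show _ = _ ++ ((code.toList.drop prev).take (c - prev) ++ pvCommentNl.toList ++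
      pvJoinRec code.toList rest c)
    simp [PySem.List.slice_natCast, List.append_assoc]

theorem pvB_eq_ref (code : String) (hD : Dom_add_risk_comments_py code) :
    (add_risk_comments_py_alt code).toList = pvRef code.toList := by
  have hDl : ∀ c ∈ code.toList, pvDomChar c = true := by
    unfold Dom_add_risk_comments_py pvDomStr at hD
    simpa using List.all_eq_true.mp hD
  show (PySem.Str.join ""
      (((pvCuts code.toList 0).foldl
          (fun (st : List String × Nat) (c : Nat) =>
            (st.1 ++ [PySem.Str.slice code (some (st.2 : Int)) (some (c : Int)), pvCommentNl], c))
          ([], 0)).1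
        ++ [PySem.Str.slice code
            (some ((((pvCuts code.toList 0).foldl
              (fun (st : List String × Nat) (c : Nat) =>
                (st.1 ++ [PySem.Str.slice code (some (st.2 : Int)) (some (c : Int)), pvCommentNl], c))
              ([], 0)).2 : Nat) : Int)) none])).toList = pvRef code.toList
  rw [pv_fold_splice code (pvCuts code.toList 0) [] 0]
  rw [pv_cuts_joinRec code.toList 0 hDl (by omega)]
  simp

-- ===== VERDICT (by name: the statement is the Claim_ definition above) =====
theorem add_risk_comments_py_spec : Claim_equal_add_risk_comments_py := by
  intro code hD
  unfold Spec_add_risk_comments_py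
  apply String.toList_injective
  rw [pvA_eq_ref, pvB_eq_ref code hD]
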